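-- pv_equiv track=rewrite | github.com/neron-png/db-project-py | RTReeUtil.py | isDominated
-- ===== SOURCE A (Python) =====
-- def isDominated(point_a, point_b):
--     """
--     Check if point A is dominated by point B.
--
--     :param point_a: List representing point A in the multi-dimensional space.
--     :param point_b: List representing point B in the multi-dimensional space.
--     :return: True if point A is dominated by point B, False otherwise.
--     """
--     any_better = False
--     any_worse = False
--
--     for a, b in zip(point_a, point_b):
--         if a > b:
--             any_better = True
--         elif a < b:
--             any_worse = True
--
--         if any_better and any_worse:
--             return False
--
--     return any_better
-- ===== SOURCE B (Python) =====
-- def isDominated(point_a, point_b):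
--     pairs = list(zip(point_a, point_b))
--     return any(a > b for a, b in pairs) and not any(a < b for a, b in pairs)
-- ===== Notes on version B (the rewrite author's own statement) =====
-- stated objective: simpler
-- what changed: Replaced the fused flag-tracking loop with early exit by two independent any() scans over the zipped pairs combined as any_better and not any_worse.
import Mathlib
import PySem

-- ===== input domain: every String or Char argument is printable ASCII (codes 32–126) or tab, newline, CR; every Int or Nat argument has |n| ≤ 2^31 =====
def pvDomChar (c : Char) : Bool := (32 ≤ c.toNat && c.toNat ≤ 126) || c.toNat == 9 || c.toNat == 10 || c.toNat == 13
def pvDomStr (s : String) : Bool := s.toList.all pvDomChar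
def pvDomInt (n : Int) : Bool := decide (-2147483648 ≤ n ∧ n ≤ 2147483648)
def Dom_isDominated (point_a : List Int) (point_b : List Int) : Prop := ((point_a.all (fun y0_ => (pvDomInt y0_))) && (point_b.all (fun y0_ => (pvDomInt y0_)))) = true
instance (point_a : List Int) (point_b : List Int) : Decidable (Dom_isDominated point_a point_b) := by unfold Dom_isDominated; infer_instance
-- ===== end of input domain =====

-- B replaces A's fused flag-tracking loop (with early exit) by two independent any-scans; objective: simpler.

-- ===== PORT A =====
-- A's loop over zip(point_a, point_b) carrying the two flags, with the early `return False`.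
def isDominatedLoop : List (Int × Int) → Bool → Bool → Bool
  | [], any_better, _ => any_better
  | (a, b) :: rest, any_better, any_worse =>
    let any_better := if a > b then true else any_better
    let any_worse := if a > b then any_worse else if a < b then true else any_worse
    if any_better && any_worse then false
    else isDominatedLoop rest any_better any_worse

def isDominated (point_a : List Int) (point_b : List Int) : Bool :=
  isDominatedLoop (point_a.zip point_b) false false

-- ===== PORT B =====
def isDominated_alt (point_a : List Int) (point_b : List Int) : Bool :=
  let pairs := point_a.zip point_b
  (pairs.any (fun p => p.1 > p.2)) && !(pairs.any (fun p => p.1 < p.2))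

-- ===== PRECONDITION & SPEC =====
def Spec_isDominated (point_a : List Int) (point_b : List Int) (out : Bool) : Prop := out = isDominated_alt point_a point_b
instance (point_a : List Int) (point_b : List Int) (out : Bool) : Decidable (Spec_isDominated point_a point_b out) := by unfold Spec_isDominated; infer_instance

-- ===== CLAIM (what is proved, stated in full; the proofs are below) =====
def Claim_equal_isDominated : Prop := ∀ (point_a : List Int) (point_b : List Int), Dom_isDominated point_a point_b → Spec_isDominated point_a point_b (isDominated point_a point_b)

-- ===== LEMMAS AND PROOFS =====

-- loop invariant: as long as the two flags are not both set, A's loop computes B's formula seeded with the flags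
theorem isDominatedLoop_eq (l : List (Int × Int)) :
    ∀ ab aw : Bool, (ab && aw) = false →
      isDominatedLoop l ab aw =
        ((ab || l.any (fun p => p.1 > p.2)) && !(aw || l.any (fun p => p.1 < p.2))) := by
  induction l with
  | nil =>
    intro ab aw h
    cases ab <;> cases aw <;> simp_all [isDominatedLoop]
  | cons hd tl ih =>
    intro ab aw h
    obtain ⟨a, b⟩ := hd
    by_cases hab : b < a
    · have h1 : decide (b < a) = true := decide_eq_true hab
      have h2 : decide (a < b) = false := decide_eq_false (by omega)
      cases ab <;> cases aw
      · simp [isDominatedLoop, h1, h2, ih true false rfl]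
      · simp [isDominatedLoop, h1, h2]
      · simp [isDominatedLoop, h1, h2, ih true false rfl]
      · exact absurd h (by decide)
    · by_cases hlt : a < b
      · have h1 : decide (b < a) = false := decide_eq_false hab
        have h2 : decide (a < b) = true := decide_eq_true hlt
        cases ab <;> cases aw
        · simp [isDominatedLoop, h1, h2, ih false true rfl]
        · simp [isDominatedLoop, h1, h2, ih false true rfl]
        · simp [isDominatedLoop, h1, h2]
        · exact absurd h (by decide)
      · have h1 : decide (b < a) = false := decide_eq_false hab
        have h2 : decide (a < b) = false := decide_eq_false hlt
        cases ab <;> cases aw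
        · simp [isDominatedLoop, h1, h2, ih false false rfl]
        · simp [isDominatedLoop, h1, h2, ih false true rfl]
        · simp [isDominatedLoop, h1, h2, ih true false rfl]
        · exact absurd h (by decide)

-- ===== VERDICT (by name: the statement is the Claim_ definition above) =====
theorem isDominated_spec : Claim_equal_isDominated := by
  intro pa pb _
  unfold Spec_isDominated isDominated isDominated_alt
  rw [isDominatedLoop_eq _ false false rfl]
  simp
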